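-- pv_equiv track=rewrite | github.com/kenandervisagic/enhanced-ai | app/love_quotes/create_quote.py | format_poem
-- ===== SOURCE A (Python) =====
-- def format_poem(text, max_words_per_line=3):
--     """Breaks text into a poetic format with short, centered lines."""
--     words = text.split()
--     poem_lines = []
--
--     while words:
--         line = " ".join(words[:max_words_per_line])
--         poem_lines.append(line)
--         words = words[max_words_per_line:]
--
--     return "\n".join(poem_lines)
-- ===== SOURCE B (Python) =====
-- def format_poem(text, max_words_per_line=3):
--     """Breaks text into a poetic format with short, centered lines."""
--     poem_lines = []
--     buf = []
--     for word in text.split():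
--         buf.append(word)
--         if len(buf) == max_words_per_line:
--             poem_lines.append(" ".join(buf))
--             buf = []
--     if buf:
--         poem_lines.append(" ".join(buf))
--     return "\n".join(poem_lines)
-- ===== Notes on version B (the rewrite author's own statement) =====
-- stated objective: alternative
-- what changed: Replaces the repeated list-slicing while-loop with a single pass that accumulates words in a buffer and flushes it each time it reaches max_words_per_line (plus a final flush), avoiding the O(n^2/k) re-slicing of the word list.
import Mathlib
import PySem

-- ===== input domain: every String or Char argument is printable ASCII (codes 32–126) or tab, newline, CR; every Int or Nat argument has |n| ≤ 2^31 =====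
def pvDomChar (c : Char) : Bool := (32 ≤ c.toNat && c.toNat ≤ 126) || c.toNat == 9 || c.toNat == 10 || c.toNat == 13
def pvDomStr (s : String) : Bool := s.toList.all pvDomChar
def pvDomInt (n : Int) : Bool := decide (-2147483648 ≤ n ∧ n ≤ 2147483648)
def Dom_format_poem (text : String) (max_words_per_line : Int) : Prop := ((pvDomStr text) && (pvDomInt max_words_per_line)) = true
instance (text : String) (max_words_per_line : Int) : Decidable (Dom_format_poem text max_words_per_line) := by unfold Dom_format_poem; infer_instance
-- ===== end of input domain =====

-- B replaces A's repeated list-slicing while-loop with one buffered pass over the words (alternative decomposition).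

-- ===== PORT A =====
-- A's while-loop; fuel = initial word count makes it total (each iteration drops ≥ 1 word when k ≥ 1; k ≤ 0 with words present diverges in Python and is outside Pre_).
def formatLoopA (k : Int) : Nat → List String → List String → List String
  | 0, _, acc => acc
  | fuel + 1, words, acc =>
    if words = [] then acc
    else
      formatLoopA k fuel (PySem.List.slice words (some k) none)
        (acc ++ [PySem.Str.join " " (PySem.List.slice words none (some k))])

def format_poem (text : String) (max_words_per_line : Int) : String :=
  PySem.Str.join "\n"
    (formatLoopA max_words_per_line (PySem.Str.split₀ text).length (PySem.Str.split₀ text) [])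

-- ===== PORT B =====
-- loop body: append the word to the buffer, flush when it reaches max_words_per_line
def stepB (k : Int) (st : List String × List String) (w : String) : List String × List String :=
  if ((st.2 ++ [w]).length : Int) = k then (st.1 ++ [PySem.Str.join " " (st.2 ++ [w])], [])
  else (st.1, st.2 ++ [w])

-- final flush of a non-empty buffer
def finB (st : List String × List String) : List String :=
  if st.2 = [] then st.1 else st.1 ++ [PySem.Str.join " " st.2]

def format_poem_alt (text : String) (max_words_per_line : Int) : String :=
  PySem.Str.join "\n" (finB ((PySem.Str.split₀ text).foldl (stepB max_words_per_line) ([], [])))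

-- ===== PRECONDITION & SPEC =====
-- Pre_ excludes exactly the inputs on which Python A never returns: with max_words_per_line ≤ 0 and at least one word, A's while-loop runs forever.
def Pre_format_poem (text : String) (max_words_per_line : Int) : Prop :=
  1 ≤ max_words_per_line ∨ PySem.Str.split₀ text = []
instance (text : String) (max_words_per_line : Int) : Decidable (Pre_format_poem text max_words_per_line) := by unfold Pre_format_poem; infer_instance

def pvWitness_format_poem : String × Int := ("roses are red violets are blue", 3)

def Spec_format_poem (text : String) (max_words_per_line : Int) (out : String) : Prop := out = format_poem_alt text max_words_per_line
instance (text : String) (max_words_per_line : Int) (out : String) : Decidable (Spec_format_poem text max_words_per_line out) := by unfold Spec_format_poem; infer_instance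

-- ===== CLAIM (what is proved, stated in full; the proofs are below) =====
def Claim_equal_format_poem : Prop := ∀ (text : String) (max_words_per_line : Int), Dom_format_poem text max_words_per_line → Pre_format_poem text max_words_per_line → Spec_format_poem text max_words_per_line (format_poem text max_words_per_line)

-- ===== LEMMAS AND PROOFS =====

theorem formatLoopA_nil (k : Int) (fuel : Nat) (acc : List String) :
    formatLoopA k fuel [] acc = acc := by
  cases fuel <;> simp [formatLoopA]

-- the buffered fold computes exactly what A's slicing loop computes, for k ≥ 1
theorem loopA_eq_fold (k : Int) (hk : 1 ≤ k) :
    ∀ (ws : List String) (fuel : Nat) (lines buf : List String),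
      buf.length < k.toNat → (buf ++ ws).length ≤ fuel →
      formatLoopA k fuel (buf ++ ws) lines = finB (ws.foldl (stepB k) (lines, buf)) := by
  intro ws
  induction ws with
  | nil =>
    intro fuel lines buf hb hf
    simp only [List.append_nil, List.foldl_nil] at *
    by_cases hbuf : buf = []
    · subst hbuf; simp [formatLoopA_nil, finB]
    · have hlen : 1 ≤ buf.length := by
        cases buf with | nil => exact absurd rfl hbuf | cons a t => simp
      cases fuel with
      | zero => omega
      | succ f =>
        simp only [formatLoopA, if_neg hbuf]
        rw [PySem.List.slice_to buf (by omega : (0:Int) ≤ k),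
            PySem.List.slice_from buf (by omega : (0:Int) ≤ k)]
        rw [List.take_of_length_le (by omega), List.drop_eq_nil_of_le (by omega)]
        simp [formatLoopA_nil, finB, hbuf]
  | cons w ws ih =>
    intro fuel lines buf hb hf
    have hne : buf ++ w :: ws ≠ [] := by simp
    have hlen : (buf ++ w :: ws).length = buf.length + 1 + ws.length := by simp; omega
    cases fuel with
    | zero => omega
    | succ f =>
      have hre : buf ++ w :: ws = (buf ++ [w]) ++ ws := by simp
      by_cases hfl : ((buf ++ [w]).length : Int) = k
      · -- buffer flushes on this word
        have hkN : k.toNat = buf.length + 1 := by simp at hfl; omega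
        simp only [formatLoopA, if_neg hne]
        rw [PySem.List.slice_to _ (by omega : (0:Int) ≤ k),
            PySem.List.slice_from _ (by omega : (0:Int) ≤ k)]
        have htk : (buf ++ w :: ws).take k.toNat = buf ++ [w] := by
          rw [hre, hkN]
          rw [List.take_append_of_le_length (by simp)]
          exact List.take_of_length_le (by simp)
        have hdr : (buf ++ w :: ws).drop k.toNat = ws := by
          rw [hre, hkN]
          have h1 : buf.length + 1 = (buf ++ [w]).length := by simp
          rw [h1, List.drop_left]
        rw [htk, hdr]
        have hih := ih f (lines ++ [PySem.Str.join " " (buf ++ [w])]) [] (by simp; omega)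
              (by simp; omega)
        simp only [List.nil_append] at hih
        rw [hih]
        simp only [List.foldl_cons, stepB, if_pos hfl]
      · -- word goes into the buffer
        have hstep : stepB k (lines, buf) w = (lines, buf ++ [w]) := by
          simp only [stepB, if_neg hfl]
        simp only [List.foldl_cons, hstep]
        rw [hre]
        exact ih (f + 1) lines (buf ++ [w]) (by simp at hfl ⊢; omega)
          (by rw [← hre]; omega)

-- ===== VERDICT (by name: the statement is the Claim_ definition above) =====
theorem format_poem_spec : Claim_equal_format_poem := by
  intro text k _ hpre
  unfold Spec_format_poem format_poem format_poem_alt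
  rcases hpre with hk | hempty
  · have h := loopA_eq_fold k hk (PySem.Str.split₀ text) (PySem.Str.split₀ text).length [] []
        (by simp; omega) (by simp)
    simp only [List.nil_append] at h
    rw [h]
  · rw [hempty]
    simp [formatLoopA, finB]
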